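-- pv_equiv track=rewrite | github.com/whiz-Tuhin/Competitve | Hackerrank/University Codesprint/seperate_numbers.py | check_forward
-- ===== SOURCE A (Python) =====
-- def check_forward(prev,remain):
--     if(len(remain) == 0):
--         return 1
--     if(len(remain) >= 1 and remain[0] == '0'):
--         return 0
--
--     a = -1   # taking -1 as intializing value
--     pos = -1
--     flag = -1
--
--     for i in range(1,(len(remain)+1)):
--         a = int(str(remain[:i]))
--         if(a == prev+1):
--             flag = 1
--             pos = i
--             break
--
--     if(flag == 1):
--         return check_forward(a,remain[pos:])
-- ===== SOURCE B (Python) =====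
-- def check_forward(prev, remain):
--     # Single forward pass: accumulate the current number digit by digit instead of
--     # re-parsing every prefix with int(); reset at each completed consecutive number.
--     cur = 0
--     fresh = True
--     for ch in remain:
--         if fresh and ch == '0':
--             return 0
--         if not ch.isdigit():
--             return None
--         cur = cur * 10 + (ord(ch) - 48)
--         fresh = False
--         if cur == prev + 1:
--             prev = cur
--             cur = 0
--             fresh = True
--     return 1 if fresh else None
-- ===== Notes on version B (the rewrite author's own statement) =====
-- stated objective: faster
-- what changed: B replaces A's tail recursion with an inner loop that re-parses every prefix remain[:i] via int() by a single left-to-right pass that accumulates the current number digit by digit (cur = cur*10 + digit) and resets it whenever it reaches prev+1.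
-- outside the precondition, e.g. on check_forward(5, '12 '): A returns None, B returns None; on check_forward(0, 'a'): A raises ValueError, B returns None
import Mathlib
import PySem

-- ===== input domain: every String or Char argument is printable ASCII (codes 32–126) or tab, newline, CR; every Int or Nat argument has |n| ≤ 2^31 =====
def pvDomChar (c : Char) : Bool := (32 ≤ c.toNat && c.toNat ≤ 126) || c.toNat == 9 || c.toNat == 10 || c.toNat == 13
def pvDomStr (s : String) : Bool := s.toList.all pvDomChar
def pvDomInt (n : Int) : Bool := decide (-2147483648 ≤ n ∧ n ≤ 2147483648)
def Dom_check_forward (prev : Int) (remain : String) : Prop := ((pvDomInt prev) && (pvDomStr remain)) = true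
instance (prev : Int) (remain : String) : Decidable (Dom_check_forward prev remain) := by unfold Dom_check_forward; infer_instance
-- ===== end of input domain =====

-- B replaces A's "re-parse every prefix with int()" scan and tail recursion by one
-- left-to-right pass that accumulates each number digit by digit (objective: faster).


-- ===== PORT A =====
-- A's inner 'for i in range(1, len(remain)+1)' loop with break: scan prefix lengths
-- from i, parse remain[:i] with int() (= PySem.Int.ofChars?; none = ValueError, which
-- aborts the whole call — such inputs lie outside Pre_check_forward), stop at the
-- first prefix whose value is the target.
def pvScan (t : Int) (cs : List Char) (i : Nat) : Option Nat :=
  if i ≤ cs.length then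
    match PySem.Int.ofChars? (PySem.List.slice cs none (some (i : Int))) with
    | some a => if a = t then some i else pvScan t cs (i + 1)
    | none => none
  else none
termination_by cs.length + 1 - i

theorem pvScan_bounds {t : Int} {cs : List Char} {i p : Nat}
    (h : pvScan t cs i = some p) : i ≤ p ∧ p ≤ cs.length := by
  fun_induction pvScan t cs i with
  | case1 i hle heq => injection h with h'; omega
  | case2 i hle a heq hne ih => have := ih h; omega
  | case3 i hle heq => simp at h
  | case4 i hnle => simp at h

def check_forward (prev : Int) (remain : String) : Option Int :=
  if remain.toList.length = 0 then some 1
  else if 1 ≤ remain.toList.length ∧ PySem.List.pyGet? remain.toList 0 = some '0' then some 0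
  else
    match h : pvScan (prev + 1) remain.toList 1 with
    | some pos => check_forward (prev + 1) (String.ofList (PySem.List.slice remain.toList (some (pos : Int)) none))
    | none => none
termination_by remain.toList.length
decreasing_by
  have hb := pvScan_bounds h
  simp only [String.toList_ofList, PySem.List.slice_from_natCast, List.length_drop]
  omega

-- ===== PORT B =====
-- B's single 'for ch in remain' loop: state (prev, cur, fresh); 'fresh' marks the
-- start of a number segment.
def pvAltGo (prev cur : Int) (fresh : Bool) : List Char → Option Int
  | [] => if fresh then some 1 else none
  | ch :: rest =>
    if fresh ∧ ch = '0' then some 0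
    else if ¬ PySem.Str.isdigit ch = true then none
    else
      let cur' := cur * 10 + ((ch.toNat : Int) - 48)
      if cur' = prev + 1 then pvAltGo cur' 0 true rest
      else pvAltGo prev cur' false rest

def check_forward_alt (prev : Int) (remain : String) : Option Int :=
  pvAltGo prev 0 true remain.toList

-- ===== PRECONDITION & SPEC =====
-- Pre_ excludes strings that are neither all ASCII digits nor '0'-led: on those A's
-- int() either raises ValueError on a non-numeric prefix, or (digits followed by
-- trailing whitespace, which int() tolerates) A happens to return None — B returns
-- None on all of them.
def Pre_check_forward (prev : Int) (remain : String) : Prop :=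
  remain.toList.all (fun c => c.isDigit) = true ∨ remain.toList.head? = some '0'
instance (prev : Int) (remain : String) : Decidable (Pre_check_forward prev remain) := by
  unfold Pre_check_forward; infer_instance

def pvWitness_check_forward : Int × String := (0, "123")

def Spec_check_forward (prev : Int) (remain : String) (out : Option Int) : Prop := out = check_forward_alt prev remain
instance (prev : Int) (remain : String) (out : Option Int) : Decidable (Spec_check_forward prev remain out) := by unfold Spec_check_forward; infer_instance

-- ===== CLAIM (what is proved, stated in full; the proofs are below) =====
def Claim_equal_check_forward : Prop := ∀ (prev : Int) (remain : String), Dom_check_forward prev remain → Pre_check_forward prev remain → Spec_check_forward prev remain (check_forward prev remain)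

-- ===== LEMMAS AND PROOFS =====

-- The decimal value of a digit string, as A's int() computes it (Horner's rule).
def pvH (ds : List Char) : Nat := ds.foldl (fun a ch => a * 10 + (ch.toNat - '0'.toNat)) 0

-- Specification of the digit-parsing loop hidden inside PySem.Int.ofChars?,
-- quantified over the loop function g so that it can be instantiated (by
-- unification and rfl) with the private parser that ofChars? calls.
theorem pvGoSpec (g : List Char → Bool → Nat → Option Nat)
  (h0 : ∀ (b : Bool) (acc : Nat), g [] b acc = if b = true then some acc else none)
  (h1 : ∀ (c : Char) (rest : List Char) (b : Bool) (acc : Nat), g (c :: rest) b acc =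
     if c.isDigit = true then g rest true (acc * 10 + (c.toNat - '0'.toNat))
     else if c = '_' ∧ b = true then
       (match rest with
        | d :: _ => if d.isDigit = true then g rest false acc else none
        | [] => none)
     else none) :
  ∀ (ds : List Char) (acc : Nat), (∀ c ∈ ds, c.isDigit = true) →
    g ds true acc = some (ds.foldl (fun a c => a * 10 + (c.toNat - '0'.toNat)) acc) := by
  intro ds
  induction ds with
  | nil => intro acc _; simp [h0]
  | cons c rest ih =>
      intro acc h
      rw [h1]
      have hc : c.isDigit = true := h c (by simp)
      simp only [hc, if_true, List.foldl_cons]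
      exact ih _ (fun x hx => h x (by simp [hx]))

theorem pvParserSpec (d : List Char → Option Nat) (g : List Char → Bool → Nat → Option Nat)
  (hdg : d = fun ds => match ds with | [] => none | cs => g cs false 0)
  (h0 : ∀ (b : Bool) (acc : Nat), g [] b acc = if b = true then some acc else none)
  (h1 : ∀ (c : Char) (rest : List Char) (b : Bool) (acc : Nat), g (c :: rest) b acc =
     if c.isDigit = true then g rest true (acc * 10 + (c.toNat - '0'.toNat))
     else if c = '_' ∧ b = true then
       (match rest with
        | d :: _ => if d.isDigit = true then g rest false acc else none
        | [] => none)
     else none)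
  (ds : List Char) (hne : ds ≠ []) (hdig : ∀ x ∈ ds, x.isDigit = true) :
  d ds = some (ds.foldl (fun a ch => a * 10 + (ch.toNat - '0'.toNat)) 0) := by
  rw [hdg]
  match ds, hne with
  | c :: rest, _ =>
    simp only []
    rw [h1]
    have hc : c.isDigit = true := hdig c (by simp)
    simp only [hc, if_true, List.foldl_cons]
    exact pvGoSpec g h0 h1 rest _ (fun x hx => hdig x (by simp [hx]))

-- int() on a nonempty all-digit string returns its decimal value.
theorem pv_parse_digits (ds : List Char) (hne : ds ≠ [])
    (h : ∀ x ∈ ds, x.isDigit = true) :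
    PySem.Int.ofChars? ds = some ((pvH ds : Nat) : Int) := by
  have hspace : ∀ x ∈ ds, PySem.Int.isIntSpace x = false := by
    intro x hx
    have hxd := h x hx
    simp only [PySem.Int.isIntSpace, Bool.or_eq_false_iff, decide_eq_false_iff_not]
    refine ⟨⟨⟨⟨⟨?_, ?_⟩, ?_⟩, ?_⟩, ?_⟩, ?_⟩ <;> (rintro rfl; exact absurd hxd (by decide))
  simp only [PySem.Int.ofChars?]
  have hd1 : List.dropWhile PySem.Int.isIntSpace ds = ds := by
    refine List.dropWhile_eq_self_iff.mpr (fun hq => ?_)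
    simp only [Bool.not_eq_true]
    exact hspace _ (List.getElem_mem _)
  have hd2 : List.dropWhile PySem.Int.isIntSpace ds.reverse = ds.reverse := by
    refine List.dropWhile_eq_self_iff.mpr (fun hq => ?_)
    simp only [Bool.not_eq_true]
    exact hspace _ (List.mem_reverse.mp (List.getElem_mem hq))
  rw [hd1, hd2, List.reverse_reverse]
  split
  · exact absurd (h '-' (by simp)) (by decide)
  · exact absurd (h '+' (by simp)) (by decide)
  · exact Eq.trans (congrArg
      (fun o : Option Nat => Option.map (fun n : Int => n) (o.bind fun a => pure (↑a : Int)))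
      (pvParserSpec _ _ rfl (fun _ _ => rfl) (fun _ _ _ _ => rfl) ds hne h)) (by simp [pvH])

-- Reference scanner: number of characters (from the current point) consumed to
-- first reach the value t, starting from accumulated value acc.
def pvStep (t : Int) (acc : Nat) : List Char → Option Nat
  | [] => none
  | d :: ds =>
      if ((acc * 10 + (d.toNat - '0'.toNat) : Nat) : Int) = t then some 1
      else (pvStep t (acc * 10 + (d.toNat - '0'.toNat)) ds).map (· + 1)

theorem pvStep_bounds {t : Int} {acc : Nat} {ds : List Char} {k : Nat}
    (h : pvStep t acc ds = some k) : 1 ≤ k ∧ k ≤ ds.length := by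
  induction ds generalizing acc k with
  | nil => simp [pvStep] at h
  | cons d ds' ih =>
      rw [pvStep] at h
      split at h
      · injection h with h'; simp [← h']
      · cases hs : pvStep t (acc * 10 + (d.toNat - '0'.toNat)) ds' with
        | none => rw [hs] at h; simp at h
        | some k' =>
            rw [hs] at h
            have := ih hs
            simp at h
            simp [← h]
            omega

-- A's prefix scan on an all-digit string is the reference scanner.
theorem pvScan_eq_step (t : Int) : ∀ (ds pre : List Char),
    (∀ x ∈ pre ++ ds, x.isDigit = true) →
    pvScan t (pre ++ ds) (pre.length + 1) =
      (pvStep t (pvH pre) ds).map (fun k => pre.length + k) := by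
  intro ds
  induction ds with
  | nil =>
      intro pre h
      rw [pvScan]
      simp [pvStep]
  | cons d ds' ih =>
      intro pre h
      rw [pvScan, if_pos (by simp)]
      have htake : (pre ++ d :: ds').take (pre.length + 1) = pre ++ [d] := by
        rw [List.take_append]
        simp
      rw [PySem.List.slice_to_natCast, htake,
        pv_parse_digits _ (by simp) (fun x hx => h x (by
          simp only [List.mem_append, List.mem_cons] at hx ⊢
          tauto))]
      have hH : pvH (pre ++ [d]) = pvH pre * 10 + (d.toNat - '0'.toNat) := by
        simp [pvH, List.foldl_append]
      simp only []
      rw [pvStep]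
      by_cases hm : ((pvH pre * 10 + (d.toNat - '0'.toNat) : Nat) : Int) = t
      · rw [if_pos (by rw [hH]; exact_mod_cast hm), if_pos hm]
        simp
      · rw [if_neg (by rw [hH]; exact_mod_cast hm), if_neg hm]
        have hre : pre ++ d :: ds' = (pre ++ [d]) ++ ds' := by simp
        have hlen : pre.length + 1 + 1 = (pre ++ [d]).length + 1 := by simp
        rw [hre, hlen, ih (pre ++ [d]) (by rw [← hre]; exact h), hH]
        cases pvStep t (pvH pre * 10 + (d.toNat - '0'.toNat)) ds' with
        | none => simp
        | some k => simp; omega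

theorem pvIsdigit_eq (c : Char) : PySem.Str.isdigit c = c.isDigit := by
  simp [PySem.Str.isdigit, PySem.Chars.isdigit, Char.isDigit, Char.le_def]
  rfl

theorem pvDigitBounds (d : Char) (hd : d.isDigit = true) : 48 ≤ d.toNat ∧ d.toNat ≤ 57 := by
  simp [Char.isDigit, decide_eq_true_eq] at hd
  exact ⟨UInt32.le_iff_toNat_le.mp hd.1, UInt32.le_iff_toNat_le.mp hd.2⟩

-- B's loop in scanning mode (fresh = false) follows the reference scanner.
theorem pvAltGo_eq_step : ∀ (ds : List Char) (prev : Int) (n : Nat),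
    (∀ x ∈ ds, x.isDigit = true) →
    pvAltGo prev (n : Int) false ds =
      (match pvStep (prev + 1) n ds with
       | none => none
       | some k => pvAltGo (prev + 1) 0 true (ds.drop k)) := by
  intro ds
  induction ds with
  | nil => intro prev n _; simp [pvAltGo, pvStep]
  | cons d ds' ih =>
      intro prev n h
      have hd : d.isDigit = true := h d (by simp)
      have hb := pvDigitBounds d hd
      have hcast : (n : Int) * 10 + ((d.toNat : Int) - 48) = ((n * 10 + (d.toNat - '0'.toNat) : Nat) : Int) := by
        simp only [show '0'.toNat = 48 from rfl]; omega
      rw [pvAltGo]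
      rw [if_neg (by simp), if_neg (by simp [pvIsdigit_eq, hd])]
      simp only [hcast]
      rw [pvStep]
      by_cases hm : ((n * 10 + (d.toNat - '0'.toNat) : Nat) : Int) = prev + 1
      · rw [if_pos hm, if_pos hm, hm]
        simp
      · rw [if_neg hm, if_neg hm]
        rw [ih prev _ (fun x hx => h x (by simp [hx]))]
        cases pvStep (prev + 1) (n * 10 + (d.toNat - '0'.toNat)) ds' with
        | none => simp
        | some k => simp

-- Both ports, viewed through the reference scanner, split off one consecutive
-- number per segment; strong induction on the string length.
theorem pvMain : ∀ (n : Nat) (s : String) (prev : Int), s.toList.length ≤ n →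
    (s.toList.all (fun c => c.isDigit) = true ∨ s.toList.head? = some '0') →
    check_forward prev s = pvAltGo prev 0 true s.toList := by
  intro n
  induction n with
  | zero =>
      intro s prev hlen hpre
      have hnil : s.toList = [] := List.eq_nil_of_length_eq_zero (Nat.le_zero.mp hlen)
      rw [check_forward]
      simp [hnil, pvAltGo]
  | succ m ih =>
      intro s prev hlen hpre
      match hcs : s.toList with
      | [] =>
          rw [check_forward]
          simp [hcs, pvAltGo]
      | c :: rest =>
          by_cases hc0 : c = '0'
          · rw [check_forward]
            rw [if_neg (by simp [hcs]), if_pos ⟨by simp [hcs],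
              by rw [hcs, PySem.List.pyGet?_zero_cons, hc0]⟩]
            rw [pvAltGo]
            simp [hc0]
          · have hdig : ∀ x ∈ c :: rest, x.isDigit = true := by
              rcases hpre with hall | hhead
              · rw [hcs] at hall
                simpa [List.all_eq_true] using hall
              · rw [hcs] at hhead
                simp at hhead
                exact absurd hhead hc0
            have hlen1 : (c :: rest).length ≤ m + 1 := hcs ▸ hlen
            have hbd := pvDigitBounds c (hdig c (by simp))
            have hcast : (0 : Int) * 10 + ((c.toNat : Int) - 48) =
                ((0 * 10 + (c.toNat - '0'.toNat) : Nat) : Int) := by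
              simp only [show '0'.toNat = 48 from rfl]; omega
            have hscan : pvScan (prev + 1) (c :: rest) 1 =
                (pvStep (prev + 1) 0 (c :: rest)).map (fun k => k) := by
              have := pvScan_eq_step (prev + 1) (c :: rest) [] (by simpa using hdig)
              simpa [pvH] using this
            rw [check_forward]
            rw [if_neg (by simp [hcs]), if_neg (by
              rw [hcs, PySem.List.pyGet?_zero_cons]
              simp [hc0])]
            rw [hcs, hscan]
            -- RHS reduction
            rw [pvAltGo]
            rw [if_neg (by simp [hc0]), if_neg (by simp [pvIsdigit_eq, hdig c (by simp)])]
            simp only [hcast]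
            rw [pvStep]
            by_cases hm : ((0 * 10 + (c.toNat - '0'.toNat) : Nat) : Int) = prev + 1
            · rw [if_pos hm, if_pos hm, hm]
              simp only [Option.map_some]
              have hsl1 : PySem.List.slice (c :: rest) (some ((1 : Nat) : Int)) none = rest := by
                rw [PySem.List.slice_from_natCast]
                rfl
              rw [hsl1]
              rw [ih (String.ofList rest) (prev + 1)
                  (by rw [String.toList_ofList]; simpa using hlen1)
                  (by rw [String.toList_ofList]; left; simp only [List.all_eq_true]
                      exact fun x hx => hdig x (by simp [hx]))]
              rw [String.toList_ofList]
            · rw [if_neg hm, if_neg hm]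
              rw [pvAltGo_eq_step rest prev _ (fun x hx => hdig x (by simp [hx]))]
              cases hstep : pvStep (prev + 1) (0 * 10 + (c.toNat - '0'.toNat)) rest with
              | none => simp
              | some k =>
                  simp only [Option.map_some]
                  have hkb := pvStep_bounds hstep
                  have hsl : PySem.List.slice (c :: rest) (some (((k + 1 : Nat)) : Int)) none = rest.drop k := by
                    rw [PySem.List.slice_from_natCast]
                    rfl
                  rw [hsl]
                  rw [ih (String.ofList (rest.drop k)) (prev + 1)
                      (by rw [String.toList_ofList]
                          simp only [List.length_drop]
                          have : rest.length ≤ m := by simpa using hlen1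
                          omega)
                      (by rw [String.toList_ofList]; left; simp only [List.all_eq_true]
                          exact fun x hx => hdig x (by simp [List.mem_of_mem_drop hx]))]
                  rw [String.toList_ofList]

theorem check_forward_spec : Claim_equal_check_forward := by
  intro prev remain _ hpre
  show check_forward prev remain = check_forward_alt prev remain
  exact pvMain remain.toList.length remain prev le_rfl hpre
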